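-- pv_equiv track=rewrite | github.com/namelesswq/science_plot_script | qe_plot/plot_qe_bands_with_pdos.py | _build_n_label_map
-- ===== SOURCE A (Python) =====
-- from typing import Dict, List, Optional, Sequence, Tuple
--
-- def _build_n_label_map(keys: Sequence[Tuple[str, int, str]], n0_map: Dict[str, int]) -> Dict[Tuple[str, int, str], str]:
--     if not n0_map:
--         return {}
--
--     label_map: Dict[Tuple[str, int, str], str] = {}
--     by_el_orb: Dict[Tuple[str, str], List[int]] = {}
--     for el, wfc_idx, orb in keys:
--         by_el_orb.setdefault((el, orb), []).append(int(wfc_idx))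
--
--     for (el, orb), wfc_list in by_el_orb.items():
--         if el not in n0_map:
--             continue
--         wfc_sorted = sorted(set(wfc_list))
--         n0 = int(n0_map[el])
--         for rank, wfc_idx in enumerate(wfc_sorted):
--             n = n0 + rank
--             label_map[(el, wfc_idx, orb)] = f"{el}-{n}{orb}"
--
--     return label_map
-- ===== SOURCE B (Python) =====
-- from typing import Dict, List, Optional, Sequence, Tuple
--
-- def _build_n_label_map(keys: Sequence[Tuple[str, int, str]], n0_map: Dict[str, int]) -> Dict[Tuple[str, int, str], str]:
--     # Rank each (el, orb) group by first appearance, decorate the distinct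
--     # triples with that group index, sort everything once, and emit labels in a
--     # single pass with a counter that resets when the group index changes.
--     order: Dict[Tuple[str, str], int] = {}
--     for el, wfc_idx, orb in keys:
--         order.setdefault((el, orb), len(order))
--
--     triples = {(order[(el, orb)], int(wfc_idx), el, orb) for el, wfc_idx, orb in keys}
--
--     label_map: Dict[Tuple[str, int, str], str] = {}
--     prev_g: Optional[int] = None
--     rank = 0
--     for g, wfc_idx, el, orb in sorted(triples, key=lambda t: (t[0], t[1])):
--         if g != prev_g:
--             prev_g, rank = g, 0
--         if el in n0_map:
--             label_map[(el, wfc_idx, orb)] = f"{el}-{int(n0_map[el]) + rank}{orb}"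
--         rank += 1
--     return label_map
-- ===== Notes on version B (the rewrite author's own statement) =====
-- stated objective: alternative
-- what changed: Replaces A's per-(el,orb)-group dedup-and-sort loops by one global sort of group-index-decorated distinct triples followed by a single linear pass with a rank counter that resets when the group index changes.
import Mathlib
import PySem

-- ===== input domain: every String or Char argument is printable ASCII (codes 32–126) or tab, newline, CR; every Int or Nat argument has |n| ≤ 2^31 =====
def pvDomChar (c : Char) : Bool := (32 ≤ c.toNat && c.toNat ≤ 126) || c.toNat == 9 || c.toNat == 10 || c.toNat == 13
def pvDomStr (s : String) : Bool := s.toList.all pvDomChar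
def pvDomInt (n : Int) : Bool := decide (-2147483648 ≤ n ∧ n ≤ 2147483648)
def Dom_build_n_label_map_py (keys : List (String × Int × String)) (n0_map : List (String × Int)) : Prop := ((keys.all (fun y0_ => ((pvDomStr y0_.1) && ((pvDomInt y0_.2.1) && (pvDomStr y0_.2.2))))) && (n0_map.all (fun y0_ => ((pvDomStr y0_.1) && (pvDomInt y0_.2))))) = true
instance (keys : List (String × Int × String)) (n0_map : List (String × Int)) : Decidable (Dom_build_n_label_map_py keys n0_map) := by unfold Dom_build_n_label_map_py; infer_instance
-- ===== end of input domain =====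

-- B replaces A's per-(el,orb)-group dedup-and-sort loops by one global sort of
-- group-index-decorated distinct triples plus a single pass with a resetting rank
-- counter (alternative decomposition, same asymptotic cost).


-- ===== PORT A =====
-- dict values are flattened tuples: (el, wfc, orb, label) for key (el, wfc, orb) ↦ label
def build_n_label_map_py (keys : List (String × Int × String)) (n0_map : List (String × Int)) : List (String × Int × String × String) :=
  if n0_map = [] then []
  else
    let by_el_orb : PySem.Dict (String × String) (List Int) :=
      keys.foldl (fun d t => PySem.Dict.modify d (t.1, t.2.2) [] (fun l => l ++ [t.2.1])) PySem.Dict.empty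
    let label_map : PySem.Dict (String × Int × String) String :=
      by_el_orb.items.foldl
        (fun lm pr =>
          -- 'if el not in n0_map: continue' + 'n0 = int(n0_map[el])' as one Option match
          match PySem.Dict.get? (⟨n0_map⟩ : PySem.Dict String Int) pr.1.1 with
          | none => lm
          | some n0 =>
            (PySem.List.enumerate (PySem.List.sorted (PySem.Set.ofList pr.2) (fun x => x) false) 0).foldl
              (fun lm rw =>
                PySem.Dict.insert lm (pr.1.1, rw.2, pr.1.2)
                  (pr.1.1 ++ "-" ++ PySem.Int.toStr (n0 + rw.1) ++ pr.1.2))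
              lm)
        PySem.Dict.empty
    label_map.items.map (fun q => (q.1.1, q.1.2.1, q.1.2.2, q.2))

-- ===== PORT B =====
def build_n_label_map_py_alt (keys : List (String × Int × String)) (n0_map : List (String × Int)) : List (String × Int × String × String) :=
  let order : PySem.Dict (String × String) Int :=
    keys.foldl (fun d t => PySem.Dict.setdefault d (t.1, t.2.2) (PySem.Dict.size d : Int)) PySem.Dict.empty
  -- order[(el, orb)]: the key is always present (inserted by the loop above); default never used
  let triples : PySem.Set (Int × Int × String × String) :=
    PySem.Set.ofList (keys.map (fun t => (PySem.Dict.getD order (t.1, t.2.2) 0, t.2.1, t.1, t.2.2)))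
  -- sorted(triples, key=lambda t: (t[0], t[1])): Python's lexicographic tuple key = Lex order
  let final :=
    (PySem.List.sorted triples (fun t => toLex (t.1, t.2.1)) false).foldl
      (fun (st : (Option Int × Int) × PySem.Dict (String × Int × String) String) t =>
        let pr := if st.1.1 = some t.1 then st.1 else (some t.1, (0 : Int))
        -- 'if el in n0_map: … int(n0_map[el]) …' as one Option match
        let lm :=
          match PySem.Dict.get? (⟨n0_map⟩ : PySem.Dict String Int) t.2.2.1 with
          | none => st.2
          | some n0 =>
            PySem.Dict.insert st.2 (t.2.2.1, t.2.1, t.2.2.2)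
              (t.2.2.1 ++ "-" ++ PySem.Int.toStr (n0 + pr.2) ++ t.2.2.2)
        ((pr.1, pr.2 + 1), lm))
      ((none, 0), PySem.Dict.empty)
  final.2.items.map (fun q => (q.1.1, q.1.2.1, q.1.2.2, q.2))

-- ===== PRECONDITION & SPEC =====
def Spec_build_n_label_map_py (keys : List (String × Int × String)) (n0_map : List (String × Int)) (out : List (String × Int × String × String)) : Prop := out = build_n_label_map_py_alt keys n0_map
instance (keys : List (String × Int × String)) (n0_map : List (String × Int)) (out : List (String × Int × String × String)) : Decidable (Spec_build_n_label_map_py keys n0_map out) := by unfold Spec_build_n_label_map_py; infer_instance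

-- ===== CLAIM (what is proved, stated in full; the proofs are below) =====
def Claim_equal_build_n_label_map_py : Prop := ∀ (keys : List (String × Int × String)) (n0_map : List (String × Int)), Dom_build_n_label_map_py keys n0_map → Spec_build_n_label_map_py keys n0_map (build_n_label_map_py keys n0_map)

-- ===== LEMMAS AND PROOFS =====

-- the distinct (el, orb) pairs in first-occurrence order
def pvGroups (keys : List (String × Int × String)) : List (String × String) :=
  PySem.List.dedup (keys.map (fun t => (t.1, t.2.2)))

-- all wfc indices of one (el, orb) group, in key order
def pvWfcs (keys : List (String × Int × String)) (p : String × String) : List Int :=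
  (keys.filter (fun t => (t.1, t.2.2) == p)).map (fun t => t.2.1)

-- sorted distinct wfc indices of one group
def pvSW (keys : List (String × Int × String)) (p : String × String) : List Int :=
  PySem.List.sorted (PySem.Set.ofList (pvWfcs keys p)) (fun x => x) false

-- the labelling a single (el, orb) group contributes to the result dict
def pvChunk (n0_map : List (String × Int)) (keys : List (String × Int × String))
    (p : String × String) (d : PySem.Dict (String × Int × String) String) :
    PySem.Dict (String × Int × String) String :=
  match PySem.Dict.get? (⟨n0_map⟩ : PySem.Dict String Int) p.1 with
  | none => d
  | some n0 =>
    (PySem.List.enumerate (pvSW keys p) 0).foldl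
      (fun d rw => PySem.Dict.insert d (p.1, rw.2, p.2) (p.1 ++ "-" ++ PySem.Int.toStr (n0 + rw.1) ++ p.2)) d

-- common normal form of both programs' result dict
def pvDict (keys : List (String × Int × String)) (n0_map : List (String × Int)) :
    PySem.Dict (String × Int × String) String :=
  (pvGroups keys).foldl (fun d p => pvChunk n0_map keys p d) PySem.Dict.empty

-- B's loop body, named
def pvStep (n0_map : List (String × Int))
    (st : (Option Int × Int) × PySem.Dict (String × Int × String) String)
    (t : Int × Int × String × String) :
    (Option Int × Int) × PySem.Dict (String × Int × String) String :=
  let pr := if st.1.1 = some t.1 then st.1 else (some t.1, (0 : Int))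
  let lm :=
    match PySem.Dict.get? (⟨n0_map⟩ : PySem.Dict String Int) t.2.2.1 with
    | none => st.2
    | some n0 =>
      PySem.Dict.insert st.2 (t.2.2.1, t.2.1, t.2.2.2)
        (t.2.2.1 ++ "-" ++ PySem.Int.toStr (n0 + pr.2) ++ t.2.2.2)
  ((pr.1, pr.2 + 1), lm)

-- B's order dict after processing groups gs
def pvMkOrder (gs : List (String × String)) : PySem.Dict (String × String) Int :=
  ⟨(PySem.List.enumerate gs 0).map (fun q => (q.2, q.1))⟩

-- B's globally sorted decorated triple list, written as chunks
def pvL (keys : List (String × Int × String)) : List (Int × Int × String × String) :=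
  (PySem.List.enumerate (pvGroups keys) 0).flatMap
    (fun q => (pvSW keys q.2).map (fun w => (q.1, w, q.2.1, q.2.2)))

-- ---- A-side ----
-- ---- A-side ----
lemma pvGet?_nil (k : String) : PySem.Dict.get? (⟨[]⟩ : PySem.Dict String Int) k = none := rfl

lemma pvChunk_nil_map (keys : List (String × Int × String)) (p : String × String)
    (d : PySem.Dict (String × Int × String) String) :
    pvChunk [] keys p d = d := by
  rw [pvChunk, pvGet?_nil]

lemma pvByEO (keys : List (String × Int × String)) :
    (keys.foldl (fun d t => PySem.Dict.modify d (t.1, t.2.2) [] (fun l => l ++ [t.2.1]))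
        (PySem.Dict.empty : PySem.Dict (String × String) (List Int))).items
      = (pvGroups keys).map (fun p => (p, pvWfcs keys p)) := by
  have hkeys : (keys.foldl (fun d t => PySem.Dict.modify d (t.1, t.2.2) [] (fun l => l ++ [t.2.1]))
      (PySem.Dict.empty : PySem.Dict (String × String) (List Int))).keys = pvGroups keys := by
    rw [PySem.Dict.keys_foldl_modify_key keys (fun t => (t.1, t.2.2)) [] (fun _ t => fun l => l ++ [t.2.1])]
    rw [PySem.Dict.keys_empty, pvGroups, PySem.List.dedup_eq_ofList]
    rfl
  have hgetD : ∀ c, (keys.foldl (fun d t => PySem.Dict.modify d (t.1, t.2.2) [] (fun l => l ++ [t.2.1]))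
      (PySem.Dict.empty : PySem.Dict (String × String) (List Int))).getD c [] = pvWfcs keys c := by
    intro c
    rw [show (fun (d : PySem.Dict (String × String) (List Int)) (t : String × Int × String) =>
          PySem.Dict.modify d (t.1, t.2.2) [] (fun l => l ++ [t.2.1]))
        = (fun d t => PySem.Dict.modify d ((((t.1, t.2.2), t.2.1) : (String × String) × Int)).1 []
            (fun l => l ++ [(((t.1, t.2.2), t.2.1) : (String × String) × Int).2])) from rfl]
    rw [← List.foldl_map (f := fun t : String × Int × String => ((t.1, t.2.2), t.2.1))
        (g := fun (d : PySem.Dict (String × String) (List Int)) (p : (String × String) × Int) =>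
          PySem.Dict.modify d p.1 [] (fun l => l ++ [p.2]))]
    rw [PySem.Dict.getD_foldl_modify_append]
    rw [PySem.Dict.getD_empty, List.filter_map, List.map_map]
    rw [pvWfcs]
    rfl
  rw [PySem.Dict.items_eq_map_keys _ (by rw [hkeys, pvGroups]; exact PySem.List.nodup_dedup _) []]
  rw [hkeys]
  exact List.map_congr_left (fun p _ => by rw [hgetD])

lemma pvA_norm (keys : List (String × Int × String)) (n0_map : List (String × Int)) :
    build_n_label_map_py keys n0_map
      = (pvDict keys n0_map).items.map (fun q => (q.1.1, q.1.2.1, q.1.2.2, q.2)) := by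
  rw [build_n_label_map_py]
  by_cases h0 : n0_map = []
  · subst h0
    simp only [if_true]
    have : pvDict keys [] = PySem.Dict.empty := by
      rw [pvDict]
      rw [show (fun (d : PySem.Dict (String × Int × String) String) (p : String × String) =>
          pvChunk [] keys p d) = (fun d _ => d) from by funext d p; exact pvChunk_nil_map keys p d]
      exact List.foldl_fixed _
    rw [this]
    rfl
  · rw [if_neg h0]
    refine congrArg _ (congrArg _ ?_)
    rw [pvByEO, List.foldl_map, pvDict]
    rfl

-- ---- B-side: order dict ----
-- ---- B-side: the sorted triple list ----
lemma pvMkOrder_contains (gs : List (String × String)) (x : String × String) :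
    (pvMkOrder gs).contains x = gs.contains x := by
  rw [pvMkOrder, PySem.Dict.contains_mk, List.any_map]
  rw [show ((fun p : (String × String) × Int => p.1 == x) ∘ (fun q : Int × (String × String) => (q.2, q.1)))
      = ((fun y => y == x) ∘ (fun q : Int × (String × String) => q.2)) from rfl]
  rw [← List.any_map, PySem.List.map_snd_enumerate]
  by_cases hx : x ∈ gs
  · simp [hx]
  · have h1 : (gs.any fun y => y == x) = false := by
      simp; exact fun a b h e => hx (e ▸ h)
    have h2 : gs.contains x = false := by
      rw [Bool.eq_false_iff]; exact fun h => hx (List.contains_iff_mem.mp h)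
    rw [h1, h2]

lemma pvMkOrder_append (gs : List (String × String)) (x : String × String) :
    pvMkOrder (gs ++ [x]) = ⟨(pvMkOrder gs).items ++ [(x, (gs.length : Int))]⟩ := by
  rw [pvMkOrder, PySem.List.enumerate_append]
  simp [pvMkOrder, PySem.List.enumerate]

lemma pvOrder_fold (xs : List (String × String)) (gs : List (String × String)) :
    xs.foldl (fun d x => PySem.Dict.setdefault d x ((PySem.Dict.size d : Nat) : Int)) (pvMkOrder gs)
      = pvMkOrder (PySem.Set.update gs xs) := by
  induction xs generalizing gs with
  | nil => rfl
  | cons x xs ih =>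
    rw [List.foldl_cons, PySem.Set.update, List.foldl_cons]
    have hsize : ((PySem.Dict.size (pvMkOrder gs) : Nat) : Int) = (gs.length : Int) := by
      simp [PySem.Dict.size, pvMkOrder]
    by_cases hx : x ∈ gs
    · have h1 : PySem.Dict.setdefault (pvMkOrder gs) x ((PySem.Dict.size (pvMkOrder gs) : Nat) : Int) = pvMkOrder gs := by
        rw [PySem.Dict.setdefault, pvMkOrder_contains]
        simp [hx]
      have h2 : PySem.Set.add gs x = gs := by
        simp [PySem.Set.add, hx]
      rw [h1, h2]; exact ih gs
    · have h1 : PySem.Dict.setdefault (pvMkOrder gs) x ((PySem.Dict.size (pvMkOrder gs) : Nat) : Int) = pvMkOrder (gs ++ [x]) := by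
        rw [PySem.Dict.setdefault, pvMkOrder_contains, hsize, pvMkOrder_append]
        simp [hx]
      have h2 : PySem.Set.add gs x = gs ++ [x] := by
        simp [PySem.Set.add, hx]
      rw [h1, h2]; exact ih (gs ++ [x])

lemma pvOrder_getD_aux (gs : List (String × String)) (s : Int) (hnd : gs.Nodup) (g : Int) (p : String × String)
    (hm : (g, p) ∈ PySem.List.enumerate gs s) :
    PySem.Dict.getD (⟨(PySem.List.enumerate gs s).map (fun q => (q.2, q.1))⟩ : PySem.Dict (String × String) Int) p 0 = g := by
  induction gs generalizing s with
  | nil => simp [PySem.List.enumerate] at hm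
  | cons y gs ih =>
    rw [PySem.List.enumerate_cons] at hm ⊢
    rw [List.map_cons]
    by_cases hp : p = y
    · subst hp
      have hg : g = s := by
        rcases List.mem_cons.mp hm with h | h
        · exact congrArg Prod.fst h
        · exfalso
          have hmem := List.mem_map_of_mem (f := fun q : Int × (String × String) => q.2) h
          rw [PySem.List.map_snd_enumerate] at hmem
          exact (List.nodup_cons.mp hnd).1 hmem
      subst hg
      simp [PySem.Dict.getD, PySem.Dict.get?]
    · have hm' : (g, p) ∈ PySem.List.enumerate gs (s + 1) := by
        rcases List.mem_cons.mp hm with h | h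
        · exact absurd (congrArg Prod.snd h) hp
        · exact h
      have hbeq : (y == p) = false := beq_eq_false_iff_ne.mpr (Ne.symm hp)
      rw [PySem.Dict.getD_eq_get?_getD, PySem.Dict.get?_mk_cons, hbeq]
      simp only [Bool.false_eq_true, if_false]
      rw [← PySem.Dict.getD_eq_get?_getD]
      exact ih (s + 1) (List.nodup_cons.mp hnd).2 hm'

lemma pvScan_inner (n0_map : List (String × Int)) (g : Int) (p : String × String)
    (ws : List Int) (j : Int) (d : PySem.Dict (String × Int × String) String) :
    (ws.map (fun w => (g, w, p.1, p.2))).foldl (pvStep n0_map) ((some g, j), d)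
      = ((some g, j + ws.length),
         (PySem.List.enumerate ws j).foldl
           (fun d rw =>
             match PySem.Dict.get? (⟨n0_map⟩ : PySem.Dict String Int) p.1 with
             | none => d
             | some n0 => PySem.Dict.insert d (p.1, rw.2, p.2) (p.1 ++ "-" ++ PySem.Int.toStr (n0 + rw.1) ++ p.2))
           d) := by
  induction ws generalizing j d with
  | nil => simp [PySem.List.enumerate]
  | cons w ws ih =>
    rw [List.map_cons, List.foldl_cons, PySem.List.enumerate_cons, List.foldl_cons]
    have hstep : pvStep n0_map ((some g, j), d) (g, w, p.1, p.2)
        = ((some g, j + 1),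
           match PySem.Dict.get? (⟨n0_map⟩ : PySem.Dict String Int) p.1 with
           | none => d
           | some n0 => PySem.Dict.insert d (p.1, w, p.2) (p.1 ++ "-" ++ PySem.Int.toStr (n0 + j) ++ p.2)) := by
      simp [pvStep]
    rw [hstep, ih]
    refine congrArg₂ Prod.mk (congrArg _ ?_) rfl
    push_cast [List.length_cons]; omega

lemma pvScan_chunks (n0_map : List (String × Int)) (keys : List (String × Int × String))
    (qs : List (Int × String × String)) (prev : Option Int) (rk : Int)
    (d : PySem.Dict (String × Int × String) String)
    (hprev : ∀ q ∈ qs, prev ≠ some q.1) (hpw : qs.Pairwise (fun a b => a.1 ≠ b.1)) :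
    ((qs.flatMap (fun q => (pvSW keys q.2).map (fun w => (q.1, w, q.2.1, q.2.2)))).foldl
        (pvStep n0_map) ((prev, rk), d)).2
      = qs.foldl (fun d q => pvChunk n0_map keys q.2 d) d := by
  induction qs generalizing prev rk d with
  | nil => simp
  | cons q qs ih =>
    rw [List.flatMap_cons, List.foldl_append, List.foldl_cons]
    cases hsw : pvSW keys q.2 with
    | nil =>
      have hchunk : pvChunk n0_map keys q.2 d = d := by
        unfold pvChunk
        cases PySem.Dict.get? (⟨n0_map⟩ : PySem.Dict String Int) q.2.1 <;>
          simp [hsw]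
      simp only [List.map_nil, List.foldl_nil]
      rw [hchunk]
      exact ih prev rk d (fun q' hq' => hprev q' (List.mem_cons_of_mem _ hq')) hpw.tail
    | cons w0 ws =>
      have h0 : ¬ (prev = some q.1) := hprev q (List.mem_cons_self) 
      have hstep : pvStep n0_map ((prev, rk), d) (q.1, w0, q.2.1, q.2.2)
          = ((some q.1, 1),
             match PySem.Dict.get? (⟨n0_map⟩ : PySem.Dict String Int) q.2.1 with
             | none => d
             | some n0 => PySem.Dict.insert d (q.2.1, w0, q.2.2) (q.2.1 ++ "-" ++ PySem.Int.toStr (n0 + 0) ++ q.2.2)) := by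
        simp [pvStep, h0]
      have hD :
          (match PySem.Dict.get? (⟨n0_map⟩ : PySem.Dict String Int) q.2.1 with
             | none => d
             | some n0 => PySem.Dict.insert d (q.2.1, w0, q.2.2) (q.2.1 ++ "-" ++ PySem.Int.toStr (n0 + 0) ++ q.2.2))
            = (PySem.List.enumerate [w0] 0).foldl
               (fun d rw =>
                 match PySem.Dict.get? (⟨n0_map⟩ : PySem.Dict String Int) q.2.1 with
                 | none => d
                 | some n0 => PySem.Dict.insert d (q.2.1, rw.2, q.2.2) (q.2.1 ++ "-" ++ PySem.Int.toStr (n0 + rw.1) ++ q.2.2)) d := by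
        cases PySem.Dict.get? (⟨n0_map⟩ : PySem.Dict String Int) q.2.1 <;>
          simp [PySem.List.enumerate]
      have hinner := pvScan_inner n0_map q.1 q.2 ws 1
      rw [List.map_cons, List.foldl_cons, hstep]
      rw [hD]
      rw [hinner]
      have hrest :
          (PySem.List.enumerate ws 1).foldl
            (fun d rw =>
              match PySem.Dict.get? (⟨n0_map⟩ : PySem.Dict String Int) q.2.1 with
              | none => d
              | some n0 => PySem.Dict.insert d (q.2.1, rw.2, q.2.2) (q.2.1 ++ "-" ++ PySem.Int.toStr (n0 + rw.1) ++ q.2.2))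
            ((PySem.List.enumerate [w0] 0).foldl
               (fun d rw =>
                 match PySem.Dict.get? (⟨n0_map⟩ : PySem.Dict String Int) q.2.1 with
                 | none => d
                 | some n0 => PySem.Dict.insert d (q.2.1, rw.2, q.2.2) (q.2.1 ++ "-" ++ PySem.Int.toStr (n0 + rw.1) ++ q.2.2)) d)
          = pvChunk n0_map keys q.2 d := by
        have happ : PySem.List.enumerate [w0] 0 ++ PySem.List.enumerate ws 1
            = PySem.List.enumerate (w0 :: ws) 0 := by
          simp [PySem.List.enumerate]
        rw [← List.foldl_append, happ]
        unfold pvChunk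
        cases hg : PySem.Dict.get? (⟨n0_map⟩ : PySem.Dict String Int) q.2.1 with
        | none => simp [List.foldl_fixed]
        | some n0 => simp [hsw]
      rw [hrest]
      exact ih (some q.1) _ _
        (fun q' hq' h => (List.rel_of_pairwise_cons hpw hq') (Option.some.inj h))
        hpw.tail

lemma pvL_pairwise (keys : List (String × Int × String)) :
    (pvL keys).Pairwise (fun a b => (toLex (a.1, a.2.1) : Int ×ₗ Int) < toLex (b.1, b.2.1)) := by
  rw [pvL, List.pairwise_flatMap]
  constructor
  · intro q hq
    rw [List.pairwise_map]
    refine (PySem.List.sorted_ofList_pairwise_lt (pvWfcs keys q.2)).imp ?_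
    intro a b hab
    exact Prod.Lex.toLex_lt_toLex.mpr (Or.inr ⟨rfl, hab⟩)
  · refine (PySem.List.pairwise_lt_enumerate (pvGroups keys) 0).imp ?_
    intro q1 q2 h12 x hx y hy
    obtain ⟨w1, _, rfl⟩ := List.mem_map.mp hx
    obtain ⟨w2, _, rfl⟩ := List.mem_map.mp hy
    exact Prod.Lex.toLex_lt_toLex.mpr (Or.inl h12)

lemma pvMemW (keys : List (String × Int × String)) (p : String × String) (w : Int) :
    w ∈ pvSW keys p ↔ ∃ t ∈ keys, (t.1, t.2.2) = p ∧ t.2.1 = w := by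
  rw [pvSW, PySem.List.mem_sorted, PySem.Set.mem_ofList, pvWfcs]
  simp [List.mem_filter]

lemma pvSorted_eq_L (keys : List (String × Int × String)) :
    PySem.List.sorted
      (PySem.Set.ofList (keys.map (fun t =>
        (PySem.Dict.getD (pvMkOrder (pvGroups keys)) (t.1, t.2.2) 0, t.2.1, t.1, t.2.2))))
      (fun t => toLex (t.1, t.2.1)) false = pvL keys := by
  have hnd : (pvGroups keys).Nodup := PySem.List.nodup_dedup _
  have hpw := pvL_pairwise keys
  refine PySem.List.sorted_eq_of_perm_of_pairwise_lt _ _ _ ?_ hpw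
  have hndL : (pvL keys).Nodup := by
    refine hpw.imp ?_
    intro a b hab e
    subst e
    exact lt_irrefl _ hab
  rw [List.perm_ext_iff_of_nodup hndL (PySem.Set.nodup_ofList _)]
  intro x
  rw [PySem.Set.mem_ofList, pvL, List.mem_flatMap]
  constructor
  · rintro ⟨q, hq, hx⟩
    obtain ⟨w, hw, rfl⟩ := List.mem_map.mp hx
    obtain ⟨t, ht, hteo, htw⟩ := (pvMemW keys q.2 w).mp hw
    refine List.mem_map.mpr ⟨t, ht, ?_⟩
    have hget : PySem.Dict.getD (pvMkOrder (pvGroups keys)) (t.1, t.2.2) 0 = q.1 := by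
      rw [hteo]
      exact pvOrder_getD_aux _ 0 hnd q.1 q.2 (by simpa using hq)
    rw [hget, htw, show t.1 = q.2.1 from congrArg Prod.fst hteo, show t.2.2 = q.2.2 from congrArg Prod.snd hteo]
  · rintro hx
    obtain ⟨t, ht, rfl⟩ := List.mem_map.mp hx
    have hp : (t.1, t.2.2) ∈ pvGroups keys := by
      rw [pvGroups, PySem.List.mem_dedup]
      exact List.mem_map_of_mem ht
    have hp2 : (t.1, t.2.2) ∈ (PySem.List.enumerate (pvGroups keys) 0).map (fun q => q.2) := by
      rwa [PySem.List.map_snd_enumerate]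
    obtain ⟨q, hq, hq2⟩ := List.mem_map.mp hp2
    refine ⟨q, hq, ?_⟩
    have hget : PySem.Dict.getD (pvMkOrder (pvGroups keys)) (t.1, t.2.2) 0 = q.1 := by
      rw [← hq2]
      exact pvOrder_getD_aux _ 0 hnd q.1 q.2 (by simpa using hq)
    refine List.mem_map.mpr ⟨t.2.1, ?_, ?_⟩
    · exact (pvMemW keys q.2 t.2.1).mpr ⟨t, ht, hq2 ▸ rfl, rfl⟩
    · rw [hget, show q.2.1 = t.1 from congrArg Prod.fst hq2, show q.2.2 = t.2.2 from congrArg Prod.snd hq2]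

-- ---- B-side: the scan ----
lemma pvB_norm (keys : List (String × Int × String)) (n0_map : List (String × Int)) :
    build_n_label_map_py_alt keys n0_map
      = (pvDict keys n0_map).items.map (fun q => (q.1.1, q.1.2.1, q.1.2.2, q.2)) := by
  rw [build_n_label_map_py_alt]
  have horder : keys.foldl (fun d t => PySem.Dict.setdefault d (t.1, t.2.2) ((PySem.Dict.size d : Nat) : Int))
      (PySem.Dict.empty : PySem.Dict (String × String) Int) = pvMkOrder (pvGroups keys) := by
    rw [← List.foldl_map (f := fun t : String × Int × String => (t.1, t.2.2))
        (g := fun d x => PySem.Dict.setdefault d x ((PySem.Dict.size d : Nat) : Int))]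
    rw [show (PySem.Dict.empty : PySem.Dict (String × String) Int) = pvMkOrder [] from rfl]
    rw [pvOrder_fold]
    refine congrArg _ ?_
    rw [pvGroups, PySem.List.dedup_eq_ofList]
    rfl
  rw [horder, pvSorted_eq_L, pvL]
  refine congrArg _ (congrArg _ ?_)
  have hchunks := pvScan_chunks n0_map keys (PySem.List.enumerate (pvGroups keys) 0) none 0
      PySem.Dict.empty (by intro q _; simp)
      ((PySem.List.pairwise_lt_enumerate (pvGroups keys) 0).imp (fun h => ne_of_lt h))
  have hfun : (fun (st : (Option Int × Int) × PySem.Dict (String × Int × String) String)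
      (t : Int × Int × String × String) =>
        let pr := if st.1.1 = some t.1 then st.1 else (some t.1, (0 : Int))
        let lm :=
          match PySem.Dict.get? (⟨n0_map⟩ : PySem.Dict String Int) t.2.2.1 with
          | none => st.2
          | some n0 =>
            PySem.Dict.insert st.2 (t.2.2.1, t.2.1, t.2.2.2)
              (t.2.2.1 ++ "-" ++ PySem.Int.toStr (n0 + pr.2) ++ t.2.2.2)
        ((pr.1, pr.2 + 1), lm)) = pvStep n0_map := rfl
  rw [hfun]
  rw [hchunks, pvDict]
  conv_rhs => rw [← PySem.List.map_snd_enumerate (pvGroups keys) 0, List.foldl_map]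

-- ===== VERDICT (by name: the statement is the Claim_ definition above) =====
theorem build_n_label_map_py_spec : Claim_equal_build_n_label_map_py := by
  intro keys n0_map _
  unfold Spec_build_n_label_map_py
  rw [pvA_norm, pvB_norm]
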